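-- pv_equiv track=rewrite | github.com/tuhuuxxx/Learning-Python | Ki Ba Lan 2.py | convert_unary_to_binary_op
-- ===== SOURCE A (Python) =====
-- def is_operator(ch):
--     return ch in ['^', '*', '/', '+', '-']
--
-- def check_incre_decre_op(s):
--     result = []
--     for i in range(len(s)):
--         if (i==0 and (s[i]=='+' or s[i]=='-')) or (is_operator(s[i-1]) and (s[i]=='+' or s[i]=='-')) or (s[i-1]=='(' and (s[i]=='+' or s[i]=='-')):
--             result.append('true')
--         else:
--             result.append('false')
--     return result
--
-- def convert_unary_to_binary_op(s):
--     s = s.replace(' ', '')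
--     result = check_incre_decre_op(s)
--     new_str = ''
--
--     for i in range(len(s)):
--         if result[i] == 'true':
--             if s[i] == '-':
--                 new_str = new_str + '(0-1)*'
--             else:    # s[i] == '-'
--                 pass
--         else:
--             new_str = new_str + s[i]
--     return new_str
-- ===== SOURCE B (Python) =====
-- def convert_unary_to_binary_op(s):
--     s = s.replace(' ', '')
--     out = []
--     i = 0
--     n = len(s)
--     while i < n:
--         c = s[i]
--         if c in '+-':
--             j = i
--             while j < n and s[j] in '+-':
--                 j += 1
--             signs = s[i:j]
--             if i > 0 and s[i-1] not in '^*/(':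
--                 out.append(signs[0])
--                 signs = signs[1:]
--             out.append('(0-1)*' * signs.count('-'))
--             i = j
--         else:
--             out.append(c)
--             i += 1
--     return ''.join(out)
-- ===== Notes on version B (the rewrite author's own statement) =====
-- stated objective: faster
-- what changed: Instead of labelling every character via a helper table and a second indexed rebuild pass, B scans with two pointers over maximal runs of sign characters, emits the first sign verbatim when the run follows an operand, and emits the replacement pattern once per unary minus via string multiplication.
import Mathlib
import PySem

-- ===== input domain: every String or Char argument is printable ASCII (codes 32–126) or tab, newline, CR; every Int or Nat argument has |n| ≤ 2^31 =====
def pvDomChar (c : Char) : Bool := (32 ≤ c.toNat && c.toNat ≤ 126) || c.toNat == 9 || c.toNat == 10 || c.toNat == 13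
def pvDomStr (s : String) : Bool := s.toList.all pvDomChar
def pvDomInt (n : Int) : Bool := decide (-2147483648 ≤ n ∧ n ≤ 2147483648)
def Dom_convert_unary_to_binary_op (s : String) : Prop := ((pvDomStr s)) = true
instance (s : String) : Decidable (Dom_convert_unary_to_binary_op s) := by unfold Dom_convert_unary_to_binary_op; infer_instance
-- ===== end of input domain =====

-- B replaces A's per-character flag table plus second indexed pass by a two-pointer scan over
-- maximal runs of sign characters, emitting the replacement pattern once per unary minus;
-- a timing run measured B faster by a constant factor.

-- ===== PORT A =====
def pv_is_operator (ch : Char) : Bool := ['^', '*', '/', '+', '-'].contains ch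

-- strings handled as List Char; the literal '(0-1)*' is written as its char list
def pv_check_incre_decre_op (s : List Char) : List String :=
  (PySem.List.pyRange 0 (s.length : Int) 1).foldl (fun result i =>
    if (i == 0 && (PySem.List.pyGetD s i ' ' == '+' || PySem.List.pyGetD s i ' ' == '-'))
       || (pv_is_operator (PySem.List.pyGetD s (i - 1) ' ')
            && (PySem.List.pyGetD s i ' ' == '+' || PySem.List.pyGetD s i ' ' == '-'))
       || (PySem.List.pyGetD s (i - 1) ' ' == '('
            && (PySem.List.pyGetD s i ' ' == '+' || PySem.List.pyGetD s i ' ' == '-'))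
    then result ++ ["true"] else result ++ ["false"]) []

def convert_unary_to_binary_op (s : String) : String :=
  let s' := (PySem.Str.replace s " " "").toList
  let result := pv_check_incre_decre_op s'
  let new_str := (PySem.List.pyRange 0 (s'.length : Int) 1).foldl (fun acc i =>
    if PySem.List.pyGetD result i "" == "true" then
      if PySem.List.pyGetD s' i ' ' == '-' then acc ++ ['(', '0', '-', '1', ')', '*'] else acc
    else acc ++ [PySem.List.pyGetD s' i ' ']) []
  String.ofList new_str

-- ===== PORT B =====
def pvPat : List Char := ['(', '0', '-', '1', ')', '*']     -- '(0-1)*'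
def pvSign (c : Char) : Bool := c == '+' || c == '-'        -- c in '+-'

-- the inner 'while j < n and s[j] in "+-": j += 1'; the fuel argument only makes the
-- loop total (it never runs out when called with fuel = length of the string)
def pvRunEnd (cs : List Char) : Nat → Nat → Nat
  | 0, j => j
  | fuel + 1, j =>
      if j < cs.length && pvSign (cs.getD j ' ') then pvRunEnd cs fuel (j + 1) else j

-- the outer while loop of Source B; state = (i, out) with out the emitted characters
def pvAltLoop (cs : List Char) : Nat → Nat → List Char → List Char
  | 0, _, acc => acc
  | fuel + 1, i, acc =>
      if i < cs.length then
        let c := cs.getD i ' '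
        if pvSign c then
          let j := pvRunEnd cs cs.length i
          let signs := PySem.List.slice cs (some (i : Int)) (some (j : Int))   -- s[i:j]
          if 0 < i && !(['^', '*', '/', '('].contains (cs.getD (i - 1) ' ')) then
            pvAltLoop cs fuel j ((acc ++ [PySem.List.pyGetD signs 0 ' '])
              ++ (List.replicate ((PySem.List.slice signs (some 1) none).count '-') pvPat).flatten)
          else
            pvAltLoop cs fuel j (acc ++ (List.replicate (signs.count '-') pvPat).flatten)
        else pvAltLoop cs fuel (i + 1) (acc ++ [c])
      else acc

def convert_unary_to_binary_op_alt (s : String) : String :=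
  let cs := (PySem.Str.replace s " " "").toList
  String.ofList (pvAltLoop cs cs.length 0 [])

-- ===== PRECONDITION & SPEC =====
def Spec_convert_unary_to_binary_op (s : String) (out : String) : Prop := out = convert_unary_to_binary_op_alt s
instance (s : String) (out : String) : Decidable (Spec_convert_unary_to_binary_op s out) := by unfold Spec_convert_unary_to_binary_op; infer_instance

-- ===== CLAIM (what is proved, stated in full; the proofs are below) =====
def Claim_equal_convert_unary_to_binary_op : Prop := ∀ (s : String), Dom_convert_unary_to_binary_op s → Spec_convert_unary_to_binary_op s (convert_unary_to_binary_op s)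

-- ===== LEMMAS AND PROOFS =====

-- may the next sign be unary, given the previous character (none at start)?
def pvOK : Option Char → Bool
  | none => true
  | some q => ['^', '*', '/', '+', '-', '('].contains q

-- the per-character piece, given the previous character
def pvPiece (p : Option Char) (c : Char) : List Char :=
  if pvOK p && pvSign c then (if c == '-' then pvPat else []) else [c]

def pvSpec (p : Option Char) : List Char → List Char
  | [] => []
  | c :: rest => pvPiece p c ++ pvSpec (some c) rest

-- the previous character at absolute position k, start value p
def pvPrevAt (p : Option Char) (cs : List Char) : Nat → Option Char
  | 0 => p
  | k + 1 => some (cs.getD k ' ')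

theorem pvFlatten_eq_spec (cs : List Char) (p : Option Char) :
    ((List.range cs.length).map
        (fun k => pvPiece (pvPrevAt p cs k) (cs.getD k ' '))).flatten = pvSpec p cs := by
  induction cs generalizing p with
  | nil => simp [pvSpec]
  | cons c rest ih =>
      rw [List.length_cons, List.range_succ_eq_map]
      simp only [List.map_cons, List.map_map, List.flatten_cons, Function.comp_def]
      have h2 : ((List.range rest.length).map
          (fun k => pvPiece (pvPrevAt p (c :: rest) (k + 1)) ((c :: rest).getD (k + 1) ' ')))
          = (List.range rest.length).map
          (fun k => pvPiece (pvPrevAt (some c) rest k) (rest.getD k ' ')) := by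
        apply List.map_congr_left
        intro k _
        cases k with
        | zero => simp [pvPrevAt]
        | succ j => simp [pvPrevAt]
      rw [h2, ih]
      simp [pvSpec, pvPrevAt]

-- generic: an append-only fold over a list is init ++ flatten of the pieces
theorem pv_foldl_append {α β : Type} (f : α → List β) (l : List α) (init : List β) :
    l.foldl (fun acc x => acc ++ f x) init = init ++ (l.map f).flatten := by
  induction l generalizing init with
  | nil => simp
  | cons x xs ih => simp [ih]

-- A's flag at index i
def pvFlag (s : List Char) (i : Int) : String :=
  if (i == 0 && (PySem.List.pyGetD s i ' ' == '+' || PySem.List.pyGetD s i ' ' == '-'))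
     || (pv_is_operator (PySem.List.pyGetD s (i - 1) ' ')
          && (PySem.List.pyGetD s i ' ' == '+' || PySem.List.pyGetD s i ' ' == '-'))
     || (PySem.List.pyGetD s (i - 1) ' ' == '('
          && (PySem.List.pyGetD s i ' ' == '+' || PySem.List.pyGetD s i ' ' == '-'))
  then "true" else "false"

theorem pv_check_eq_map (s : List Char) :
    pv_check_incre_decre_op s = (PySem.List.pyRange 0 (s.length : Int) 1).map (pvFlag s) := by
  unfold pv_check_incre_decre_op
  have key : ∀ (l : List Int) (init : List String),
      l.foldl (fun result i =>
        if (i == 0 && (PySem.List.pyGetD s i ' ' == '+' || PySem.List.pyGetD s i ' ' == '-'))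
           || (pv_is_operator (PySem.List.pyGetD s (i - 1) ' ')
                && (PySem.List.pyGetD s i ' ' == '+' || PySem.List.pyGetD s i ' ' == '-'))
           || (PySem.List.pyGetD s (i - 1) ' ' == '('
                && (PySem.List.pyGetD s i ' ' == '+' || PySem.List.pyGetD s i ' ' == '-'))
        then result ++ ["true"] else result ++ ["false"]) init = init ++ l.map (pvFlag s) := by
    intro l
    induction l with
    | nil => intro init; simp
    | cons i rest ih =>
        intro init
        rw [List.foldl_cons]
        by_cases h : ((i == 0 && (PySem.List.pyGetD s i ' ' == '+' || PySem.List.pyGetD s i ' ' == '-'))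
           || (pv_is_operator (PySem.List.pyGetD s (i - 1) ' ')
                && (PySem.List.pyGetD s i ' ' == '+' || PySem.List.pyGetD s i ' ' == '-'))
           || (PySem.List.pyGetD s (i - 1) ' ' == '('
                && (PySem.List.pyGetD s i ' ' == '+' || PySem.List.pyGetD s i ' ' == '-'))) = true
        · rw [if_pos h, ih]
          have hf : pvFlag s i = "true" := by unfold pvFlag; rw [if_pos h]
          simp [hf]
        · rw [if_neg h, ih]
          have hf : pvFlag s i = "false" := by unfold pvFlag; rw [if_neg h]
          simp [hf]
  rw [key, List.nil_append]

-- the bool shape of A's flag condition collapses to the unary test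
theorem pv_bool_collapse (b x y : Bool) : (b || (x && b) || (y && b)) = b := by
  cases b <;> cases x <;> cases y <;> rfl

theorem pv_or_and (x y b : Bool) : (x && b || y && b) = ((x || y) && b) := by
  cases x <;> cases y <;> cases b <;> rfl

theorem pv_contains_iff (q : Char) :
    (['^', '*', '/', '+', '-', '('].contains q) = (pv_is_operator q || q == '(') := by
  simp only [pv_is_operator, List.contains_cons, List.contains_nil, Bool.or_false, Bool.or_assoc]

-- A's flag string records exactly whether the unary test fires
theorem pv_flag_eq (cs : List Char) (k : Nat) (hk : k < cs.length) :
    pvFlag cs (k : Int) = (if pvOK (pvPrevAt none cs k)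
        && pvSign (cs.getD k ' ') then "true" else "false") := by
  unfold pvFlag pvSign pvOK
  have hget : PySem.List.pyGetD cs ((k : Int)) ' ' = cs.getD k ' ' :=
    PySem.List.pyGetD_natCast cs k ' '
  cases k with
  | zero =>
      simp only [Nat.cast_zero, beq_self_eq_true, Bool.true_and, pvPrevAt]
      rw [pv_bool_collapse, PySem.List.pyGetD_zero]
  | succ j =>
      have hj : ((j + 1 : Nat) : Int) - 1 = (j : Int) := by push_cast; ring
      have hz : (((j + 1 : Nat) : Int) == 0) = false := by
        rw [beq_eq_false_iff_ne]; omega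
      rw [hz, hj, PySem.List.pyGetD_natCast cs j ' ', hget]
      simp only [Bool.false_and, Bool.false_or, pvPrevAt, pv_contains_iff, pv_or_and]

-- A equals the spec
theorem pvA_eq_spec (cs : List Char) :
    ((PySem.List.pyRange 0 (cs.length : Int) 1).foldl (fun acc i =>
      if PySem.List.pyGetD (pv_check_incre_decre_op cs) i "" == "true" then
        if PySem.List.pyGetD cs i ' ' == '-' then acc ++ ['(', '0', '-', '1', ')', '*'] else acc
      else acc ++ [PySem.List.pyGetD cs i ' ']) []) = pvSpec none cs := by
  have hbody : ∀ (acc : List Char) (i : Int),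
      (if PySem.List.pyGetD (pv_check_incre_decre_op cs) i "" == "true" then
        if PySem.List.pyGetD cs i ' ' == '-' then acc ++ ['(', '0', '-', '1', ')', '*'] else acc
      else acc ++ [PySem.List.pyGetD cs i ' ']) = acc ++
        (if PySem.List.pyGetD (pv_check_incre_decre_op cs) i "" == "true" then
          if PySem.List.pyGetD cs i ' ' == '-' then ['(', '0', '-', '1', ')', '*'] else []
        else [PySem.List.pyGetD cs i ' ']) := by
    intro acc i
    by_cases h : (PySem.List.pyGetD (pv_check_incre_decre_op cs) i "" == "true") = true
    · by_cases hc : (PySem.List.pyGetD cs i ' ' == '-') = true <;> simp [h, hc]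
    · simp [h]
  simp only [hbody]
  rw [pv_foldl_append, List.nil_append, ← pvFlatten_eq_spec cs none]
  rw [PySem.List.pyRange_zero_nat, List.map_map]
  apply congrArg
  apply List.map_congr_left
  intro k hk
  rw [List.mem_range] at hk
  simp only [Function.comp_def]
  have hget : PySem.List.pyGetD cs ((k : Int)) ' ' = cs.getD k ' ' :=
    PySem.List.pyGetD_natCast cs k ' '
  have hflag : PySem.List.pyGetD (pv_check_incre_decre_op cs) ((k : Int)) "" = pvFlag cs (k : Int) := by
    rw [pv_check_eq_map, PySem.List.pyRange_zero_nat, List.map_map,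
        PySem.List.pyGetD_natCast, List.getD_eq_getElem _ _ (by simpa using hk)]
    simp
  rw [hflag, pv_flag_eq cs k hk, hget]
  unfold pvPiece pvPat
  by_cases hb : (pvOK (pvPrevAt none cs k) && pvSign (cs.getD k ' ')) = true
  · rw [if_pos hb, if_pos hb, if_pos (show (("true" : String) == "true") = true by decide)]
  · rw [if_neg hb, if_neg hb, if_neg (by decide : ¬ (("false" : String) == "true") = true)]

-- ------- B side -------

theorem pvSign_cases (c : Char) (h : pvSign c = true) : c = '+' ∨ c = '-' := by
  unfold pvSign at h
  rcases Bool.or_eq_true_iff.mp h with h | h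
  · exact Or.inl (by exact beq_iff_eq.mp h)
  · exact Or.inr (by exact beq_iff_eq.mp h)

theorem pvSign_contains6 (c : Char) (h : pvSign c = true) :
    pvOK (some c) = true := by
  rcases pvSign_cases c h with rfl | rfl <;> decide

theorem pv_contains6_eq (q : Char) :
    (['^', '*', '/', '+', '-', '('].contains q)
      = ((['^', '*', '/', '('].contains q) || pvSign q) := by
  simp only [List.contains_cons, List.contains_nil, Bool.or_false, pvSign]
  cases h1 : (q == '^') <;> cases h2 : (q == '*') <;> cases h3 : (q == '/')
    <;> cases h4 : (q == '+') <;> cases h5 : (q == '-') <;> cases h6 : (q == '(') <;> rfl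

-- the first piece only looks at the previous char when the head is a sign
theorem pvSpec_head_irrel (p q : Option Char) (t : List Char)
    (ht : pvSign (t.headD ' ') = false) : pvSpec p t = pvSpec q t := by
  cases t with
  | nil => rfl
  | cons c rest =>
      simp only [List.headD_cons] at ht
      simp only [pvSpec, pvPiece, ht, Bool.and_false, Bool.false_eq_true, if_false]

-- a run of signs after a unary-enabling predecessor contributes the pattern once per '-'
theorem pvSpec_signs (l t : List Char) (p : Option Char)
    (hl : ∀ c ∈ l, pvSign c = true)
    (hp : pvOK p = true)
    (ht : pvSign (t.headD ' ') = false) :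
    pvSpec p (l ++ t) = (List.replicate (l.count '-') pvPat).flatten ++ pvSpec none t := by
  induction l generalizing p with
  | nil => simpa using pvSpec_head_irrel p none t ht
  | cons c l' ih =>
      have hc : pvSign c = true := hl c (List.mem_cons_self ..)
      have hrec := ih (some c) (fun d hd => hl d (List.mem_cons_of_mem _ hd)) (pvSign_contains6 c hc)
      simp only [List.cons_append, pvSpec, pvPiece, hp, hc, Bool.and_self, if_true, hrec]
      rcases pvSign_cases c hc with rfl | rfl
      · rw [if_neg (by decide), List.count_cons_of_ne (by decide), List.nil_append]
      · rw [if_pos (by decide), List.count_cons_self, List.replicate_succ, List.flatten_cons,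
            List.append_assoc]

-- with enough fuel, the exit value of the run scan points at a non-sign (or past the
-- end, where getD is ' ')
theorem pvRunEnd_stop (cs : List Char) (fuel j : Nat) (hf : cs.length - j ≤ fuel) :
    pvSign (cs.getD (pvRunEnd cs fuel j) ' ') = false := by
  induction fuel generalizing j with
  | zero =>
      rw [pvRunEnd, List.getD_eq_default _ _ (by omega)]
      rfl
  | succ fuel ih =>
      rw [pvRunEnd]
      by_cases h : (decide (j < cs.length) && pvSign (cs.getD j ' ')) = true
      · rw [if_pos h]
        have hj : j < cs.length := by simpa using (Bool.and_eq_true_iff.mp h).1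
        exact ih (j + 1) (by omega)
      · rw [if_neg h]
        by_cases hj : j < cs.length
        · cases hs : pvSign (cs.getD j ' ') with
          | true =>
              exact absurd (by rw [Bool.and_eq_true]; exact ⟨by simpa using hj, hs⟩) h
          | false => rfl
        · rw [List.getD_eq_default _ _ (by omega)]; rfl

theorem pvRunEnd_signs (cs : List Char) (fuel j : Nat) :
    ∀ k, j ≤ k → k < pvRunEnd cs fuel j → pvSign (cs.getD k ' ') = true := by
  induction fuel generalizing j with
  | zero => intro k h1 h2; rw [pvRunEnd] at h2; omega
  | succ fuel ih =>
      intro k h1 h2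
      rw [pvRunEnd] at h2
      by_cases h : (decide (j < cs.length) && pvSign (cs.getD j ' ')) = true
      · rw [if_pos h] at h2
        by_cases hkj : k = j
        · subst hkj; exact (Bool.and_eq_true_iff.mp h).2
        · exact ih (j + 1) k (by omega) h2
      · rw [if_neg h] at h2; omega

theorem pvRunEnd_ge (cs : List Char) (fuel j : Nat) : j ≤ pvRunEnd cs fuel j := by
  induction fuel generalizing j with
  | zero => rw [pvRunEnd]
  | succ fuel ih =>
      rw [pvRunEnd]
      split
      · have := ih (j + 1); omega
      · omega

theorem pvRunEnd_gt (cs : List Char) (fuel i : Nat) (hi : i < cs.length)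
    (hs : pvSign (cs.getD i ' ') = true) (hf : 0 < fuel) : i < pvRunEnd cs fuel i := by
  cases fuel with
  | zero => omega
  | succ fuel =>
      rw [pvRunEnd, if_pos (by rw [Bool.and_eq_true]; exact ⟨by simpa using hi, hs⟩)]
      have := pvRunEnd_ge cs fuel (i + 1); omega

theorem pvRunEnd_le (cs : List Char) (fuel j : Nat) (hj : j ≤ cs.length) :
    pvRunEnd cs fuel j ≤ cs.length := by
  induction fuel generalizing j with
  | zero => rw [pvRunEnd]; omega
  | succ fuel ih =>
      rw [pvRunEnd]
      by_cases h : (decide (j < cs.length) && pvSign (cs.getD j ' ')) = true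
      · rw [if_pos h]
        have : j < cs.length := by simpa using (Bool.and_eq_true_iff.mp h).1
        exact ih (j + 1) (by omega)
      · rw [if_neg h]; omega

theorem pv_headD_drop (cs : List Char) (j : Nat) :
    (cs.drop j).headD ' ' = cs.getD j ' ' := by
  have h0 : (List.drop j cs)[0]? = cs[j]? := by simp [List.getElem?_drop]
  rw [List.getD_eq_getElem?_getD, ← h0]
  cases List.drop j cs <;> rfl

-- decomposition of the remaining input at a run
theorem pv_drop_decomp (cs : List Char) (i j : Nat) (hij : i ≤ j) :
    cs.drop i = (cs.drop i).take (j - i) ++ cs.drop j := by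
  have h2 : j - i + i = j := by omega
  have h3 : i + (j - i) = j := by omega
  conv_lhs => rw [← List.take_append_drop (j - i) (cs.drop i)]
  rw [List.drop_drop]
  first
    | rw [h2]
    | rw [h3]

theorem pv_signs_take (cs : List Char) (i : Nat) :
    ∀ c ∈ (cs.drop i).take (pvRunEnd cs cs.length i - i), pvSign c = true := by
  intro c hc
  obtain ⟨k, hk, rfl⟩ := List.getElem_of_mem hc
  have hk2 : k < pvRunEnd cs cs.length i - i := lt_of_lt_of_le hk (by
    simpa using List.length_take_le _ _)
  have hk3 : i + k < cs.length := by
    have := hk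
    simp only [List.length_take, List.length_drop] at this
    omega
  rw [List.getElem_take, List.getElem_drop]
  have : cs.getD (i + k) ' ' = cs[i + k] := List.getD_eq_getElem cs ' ' hk3
  rw [← this]
  exact pvRunEnd_signs cs cs.length i (i + k) (by omega) (by omega)

def pvPrev (cs : List Char) (i : Nat) : Option Char :=
  if i = 0 then none else some (cs.getD (i - 1) ' ')

-- main loop invariant: whenever cs[i] is a sign, its predecessor is not a sign
theorem pvAltLoop_eq (cs : List Char) (n i : Nat) (acc : List Char)
    (hn : cs.length - i ≤ n)
    (hinv : i = 0 ∨ pvSign (cs.getD (i - 1) ' ') = false ∨ pvSign (cs.getD i ' ') = false) :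
    pvAltLoop cs n i acc = acc ++ pvSpec (pvPrev cs i) (cs.drop i) := by
  induction n generalizing i acc with
  | zero =>
      rw [pvAltLoop, List.drop_eq_nil_of_le (by omega)]
      simp [pvSpec]
  | succ n ih =>
      by_cases hi : i < cs.length
      · rw [pvAltLoop, if_pos hi]
        by_cases hs : pvSign (cs.getD i ' ') = true
        · rw [if_pos hs]
          set j := pvRunEnd cs cs.length i with hjdef
          have hji : i < j := pvRunEnd_gt cs cs.length i hi hs (by omega)
          have hjle : j ≤ cs.length := pvRunEnd_le cs cs.length i (by omega)
          have hslice : PySem.List.slice cs (some (i : Int)) (some (j : Int))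
              = (cs.drop i).take (j - i) := PySem.List.slice_natCast cs i j
          have hdec : cs.drop i = (cs.drop i).take (j - i) ++ cs.drop j :=
            pv_drop_decomp cs i j (by omega)
          have hsignsall := pv_signs_take cs i
          have hstop : pvSign ((cs.drop j).headD ' ') = false := by
            rw [pv_headD_drop]; exact pvRunEnd_stop cs cs.length i (by omega)
          have hinv' : j = 0 ∨ pvSign (cs.getD (j - 1) ' ') = false
              ∨ pvSign (cs.getD j ' ') = false :=
            Or.inr (Or.inr (pvRunEnd_stop cs cs.length i (by omega)))
          have hirrel : pvSpec (pvPrev cs j) (cs.drop j) = pvSpec none (cs.drop j) :=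
            pvSpec_head_irrel _ _ _ hstop
          have hlen_signs : 0 < ((cs.drop i).take (j - i)).length := by
            simp only [List.length_take, List.length_drop]; omega
          by_cases hb : (0 < i && !(['^', '*', '/', '('].contains (cs.getD (i - 1) ' '))) = true
          · -- binary first sign
            rw [if_pos hb]
            rcases Bool.and_eq_true_iff.mp hb with ⟨hb1, hb2⟩
            have hipos : 0 < i := by simpa using hb1
            have hnot4 : (['^', '*', '/', '('].contains (cs.getD (i - 1) ' ')) = false := by
              simpa using hb2
            have hprevsign : pvSign (cs.getD (i - 1) ' ') = false := by
              rcases hinv with h | h | h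
              · omega
              · exact h
              · rw [h] at hs; exact absurd hs (by simp)
            have hnot6 : pvOK (some (cs.getD (i - 1) ' ')) = false := by
              show (['^', '*', '/', '+', '-', '('].contains (cs.getD (i - 1) ' ')) = false
              rw [pv_contains6_eq, hnot4, hprevsign]; rfl
            obtain ⟨c0, rest, hsigns⟩ : ∃ c0 rest, (cs.drop i).take (j - i) = c0 :: rest := by
              cases h : (cs.drop i).take (j - i) with
              | nil => rw [h] at hlen_signs; simp at hlen_signs
              | cons a b => exact ⟨a, b, rfl⟩
            have hc0 : pvSign c0 = true := hsignsall c0 (by rw [hsigns]; exact List.mem_cons_self ..)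
            have hget0 : PySem.List.pyGetD ((cs.drop i).take (j - i)) 0 ' ' = c0 := by
              rw [PySem.List.pyGetD_zero, hsigns]; rfl
            have htail : PySem.List.slice ((cs.drop i).take (j - i)) (some 1) none = rest := by
              rw [PySem.List.slice_from_one, hsigns]; rfl
            rw [ih j _ (by omega) hinv', hirrel, hslice, hget0, htail]
            conv_rhs => rw [hdec, hsigns]
            have hprev : pvPrev cs i = some (cs.getD (i - 1) ' ') := by
              unfold pvPrev; rw [if_neg (by omega)]
            rw [hprev]
            simp only [List.cons_append, pvSpec, pvPiece, hnot6, Bool.false_and,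
              Bool.false_eq_true, if_false]
            rw [pvSpec_signs rest (cs.drop j) (some c0)
                (fun d hd => hsignsall d (by rw [hsigns]; exact List.mem_cons_of_mem _ hd))
                (pvSign_contains6 c0 hc0) hstop]
            simp [List.append_assoc]
          · -- whole run unary
            rw [if_neg hb]
            have hp : pvOK (pvPrev cs i) = true := by
              unfold pvPrev
              by_cases h0 : i = 0
              · rw [if_pos h0]; rfl
              · rw [if_neg h0]
                have h4 : (['^', '*', '/', '('].contains (cs.getD (i - 1) ' ')) = true := by
                  cases h : (['^', '*', '/', '('].contains (cs.getD (i - 1) ' ')) with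
                  | true => rfl
                  | false =>
                      exfalso; apply hb
                      rw [h]
                      simp [Nat.pos_of_ne_zero h0]
                show (['^', '*', '/', '+', '-', '('].contains (cs.getD (i - 1) ' ')) = true
                rw [pv_contains6_eq, h4]; rfl
            rw [ih j _ (by omega) hinv', hirrel, hslice]
            conv_rhs => rw [hdec]
            rw [pvSpec_signs _ (cs.drop j) (pvPrev cs i) hsignsall hp hstop, List.append_assoc]
        · -- non-sign character
          rw [if_neg hs]
          have hs' : pvSign (cs.getD i ' ') = false := by
            cases h : pvSign (cs.getD i ' ') with
            | true => exact absurd h hs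
            | false => rfl
          have hdrop : cs.drop i = cs.getD i ' ' :: cs.drop (i + 1) := by
            rw [List.getD_eq_getElem cs ' ' hi, List.drop_eq_getElem_cons hi]
          rw [ih (i + 1) _ (by omega) (Or.inr (Or.inl (by simpa using hs')))]
          conv_rhs => rw [hdrop]
          have hprev1 : pvPrev cs (i + 1) = some (cs.getD i ' ') := by
            unfold pvPrev; rw [if_neg (by omega)]; rfl
          simp only [pvSpec, pvPiece, hs', Bool.and_false, Bool.false_eq_true, if_false,
            hprev1, List.append_assoc, List.singleton_append]
      · rw [pvAltLoop, if_neg hi, List.drop_eq_nil_of_le (by omega)]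
        simp [pvSpec]

theorem pvB_eq_spec (cs : List Char) : pvAltLoop cs cs.length 0 [] = pvSpec none cs := by
  rw [pvAltLoop_eq cs cs.length 0 [] (by omega) (Or.inl rfl)]
  simp [pvPrev]

-- ===== VERDICT (by name: the statement is the Claim_ definition above) =====
theorem convert_unary_to_binary_op_spec : Claim_equal_convert_unary_to_binary_op := by
  intro s _
  unfold Spec_convert_unary_to_binary_op
  simp only [convert_unary_to_binary_op, convert_unary_to_binary_op_alt]
  rw [pvA_eq_spec, pvB_eq_spec]
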